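-- pv_equiv track=rewrite | github.com/codeyousef/KreeKt | mass_fix_errors.py | parse_errors
-- ===== SOURCE A (Python) =====
-- def parse_errors(errors):
--     """Parse errors into categories."""
--     unresolved_references = []
--     type_mismatches = []
--     overload_ambiguity = []
--     other_errors = []
--
--     for error in errors:
--         if 'Unresolved reference' in error:
--             unresolved_references.append(error)
--         elif 'type mismatch' in error:
--             type_mismatches.append(error)
--         elif 'Overload resolution ambiguity' in error:
--             overload_ambiguity.append(error)
--         else:
--             other_errors.append(error)
--
--     return {
--         'unresolved': unresolved_references,
--         'type_mismatch': type_mismatches,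
--         'overload': overload_ambiguity,
--         'other': other_errors
--     }
-- ===== SOURCE B (Python) =====
-- def parse_errors(errors):
--     """Parse errors into categories by successive partitioning of the remainder."""
--     def partition(sub, xs):
--         hit, miss = [], []
--         for x in xs:
--             (hit if sub in x else miss).append(x)
--         return hit, miss
--
--     unresolved, rest = partition('Unresolved reference', errors)
--     type_mismatch, rest = partition('type mismatch', rest)
--     overload, other = partition('Overload resolution ambiguity', rest)
--     return {
--         'unresolved': unresolved,
--         'type_mismatch': type_mismatch,
--         'overload': overload,
--         'other': other
--     }
-- ===== Notes on version B (the rewrite author's own statement) =====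
-- stated objective: alternative
-- what changed: Replaced the single-pass four-way if/elif dispatch with three staged partition passes: each pattern splits the remaining unmatched errors into its bucket and a shrinking remainder, the final remainder being 'other'.
import Mathlib
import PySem

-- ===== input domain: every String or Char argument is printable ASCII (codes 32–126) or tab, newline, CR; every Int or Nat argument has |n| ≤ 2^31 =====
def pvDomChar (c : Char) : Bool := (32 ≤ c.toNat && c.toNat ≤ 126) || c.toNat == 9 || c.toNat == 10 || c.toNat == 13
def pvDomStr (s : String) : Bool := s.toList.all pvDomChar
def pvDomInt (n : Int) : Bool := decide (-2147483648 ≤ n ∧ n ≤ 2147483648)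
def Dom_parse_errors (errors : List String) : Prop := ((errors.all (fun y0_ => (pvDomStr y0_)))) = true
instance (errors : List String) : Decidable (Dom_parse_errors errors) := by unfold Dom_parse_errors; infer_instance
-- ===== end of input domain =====

-- B replaces A's single-pass if/elif dispatch with three staged partition passes over a shrinking remainder (objective: alternative decomposition, same cost).

-- ===== PORT A =====
def parse_errors (errors : List String) : List (String × List String) :=
  let s := errors.foldl
    (fun (acc : List String × List String × List String × List String) error =>
      if PySem.Str.isIn "Unresolved reference" error then
        (acc.1 ++ [error], acc.2.1, acc.2.2.1, acc.2.2.2)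
      else if PySem.Str.isIn "type mismatch" error then
        (acc.1, acc.2.1 ++ [error], acc.2.2.1, acc.2.2.2)
      else if PySem.Str.isIn "Overload resolution ambiguity" error then
        (acc.1, acc.2.1, acc.2.2.1 ++ [error], acc.2.2.2)
      else
        (acc.1, acc.2.1, acc.2.2.1, acc.2.2.2 ++ [error]))
    ([], [], [], [])
  [("unresolved", s.1), ("type_mismatch", s.2.1), ("overload", s.2.2.1), ("other", s.2.2.2)]

-- ===== PORT B =====
-- partition(sub, xs): one loop appending each x to hit or miss
def pvPart (sub : String) (xs : List String) : List String × List String :=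
  xs.foldl
    (fun (acc : List String × List String) x =>
      if PySem.Str.isIn sub x then (acc.1 ++ [x], acc.2) else (acc.1, acc.2 ++ [x]))
    ([], [])

def parse_errors_alt (errors : List String) : List (String × List String) :=
  let p1 := pvPart "Unresolved reference" errors
  let p2 := pvPart "type mismatch" p1.2
  let p3 := pvPart "Overload resolution ambiguity" p2.2
  [("unresolved", p1.1), ("type_mismatch", p2.1), ("overload", p3.1), ("other", p3.2)]

-- ===== PRECONDITION & SPEC =====
def Spec_parse_errors (errors : List String) (out : List (String × List String)) : Prop := out = parse_errors_alt errors
instance (errors : List String) (out : List (String × List String)) : Decidable (Spec_parse_errors errors out) := by unfold Spec_parse_errors; infer_instance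

-- ===== CLAIM (what is proved, stated in full; the proofs are below) =====
def Claim_equal_parse_errors : Prop := ∀ (errors : List String), Dom_parse_errors errors → Spec_parse_errors errors (parse_errors errors)

-- ===== LEMMAS AND PROOFS =====

lemma pvPart_acc (sub : String) (xs : List String) :
    ∀ h m : List String,
      xs.foldl
        (fun (acc : List String × List String) x =>
          if PySem.Str.isIn sub x then (acc.1 ++ [x], acc.2) else (acc.1, acc.2 ++ [x]))
        (h, m) =
      (h ++ xs.filter (fun x => PySem.Str.isIn sub x),
       m ++ xs.filter (fun x => !PySem.Str.isIn sub x)) := by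
  induction xs with
  | nil => intro h m; simp
  | cons e rest ih =>
    intro h m
    rw [List.foldl_cons]
    by_cases hc : PySem.Str.isIn sub e
    · rw [if_pos hc, ih]
      simp only [PySem.Str.isIn_eq] at hc
      simp [List.filter_cons, hc]
    · rw [if_neg hc, ih]
      simp only [Bool.not_eq_true, PySem.Str.isIn_eq] at hc
      simp [List.filter_cons, hc]

lemma pvPart_eq (sub : String) (xs : List String) :
    pvPart sub xs =
      (xs.filter (fun x => PySem.Str.isIn sub x),
       xs.filter (fun x => !PySem.Str.isIn sub x)) := by
  unfold pvPart
  rw [pvPart_acc]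
  simp

lemma pvLoopA_eq (errors : List String) :
    ∀ u t o x : List String,
      errors.foldl
        (fun (acc : List String × List String × List String × List String) error =>
          if PySem.Str.isIn "Unresolved reference" error then
            (acc.1 ++ [error], acc.2.1, acc.2.2.1, acc.2.2.2)
          else if PySem.Str.isIn "type mismatch" error then
            (acc.1, acc.2.1 ++ [error], acc.2.2.1, acc.2.2.2)
          else if PySem.Str.isIn "Overload resolution ambiguity" error then
            (acc.1, acc.2.1, acc.2.2.1 ++ [error], acc.2.2.2)
          else
            (acc.1, acc.2.1, acc.2.2.1, acc.2.2.2 ++ [error]))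
        (u, t, o, x) =
      (u ++ (pvPart "Unresolved reference" errors).1,
       t ++ (pvPart "type mismatch" (pvPart "Unresolved reference" errors).2).1,
       o ++ (pvPart "Overload resolution ambiguity"
              (pvPart "type mismatch" (pvPart "Unresolved reference" errors).2).2).1,
       x ++ (pvPart "Overload resolution ambiguity"
              (pvPart "type mismatch" (pvPart "Unresolved reference" errors).2).2).2) := by
  induction errors with
  | nil => intro u t o x; simp [pvPart]
  | cons e rest ih =>
    intro u t o x
    rw [List.foldl_cons]
    by_cases h1 : PySem.Str.isIn "Unresolved reference" e
    · rw [if_pos h1, ih]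
      simp only [pvPart_eq, List.filter_cons, h1, Bool.not_true, Bool.not_false,
        reduceIte, List.cons_append, List.nil_append, List.append_assoc,
        List.singleton_append]
      simp
    · rw [if_neg h1]
      have h1' : PySem.Str.isIn "Unresolved reference" e = false := by
        exact Bool.not_eq_true _ |>.mp h1
      by_cases h2 : PySem.Str.isIn "type mismatch" e
      · rw [if_pos h2, ih]
        simp only [pvPart_eq, List.filter_cons, h1', h2, Bool.not_true, Bool.not_false,
          reduceIte, List.cons_append, List.nil_append, List.append_assoc,
          List.singleton_append]
        simp
      · rw [if_neg h2]
        have h2' : PySem.Str.isIn "type mismatch" e = false := by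
          exact Bool.not_eq_true _ |>.mp h2
        by_cases h3 : PySem.Str.isIn "Overload resolution ambiguity" e
        · rw [if_pos h3, ih]
          simp only [pvPart_eq, List.filter_cons, h1', h2', h3, Bool.not_true,
            Bool.not_false, reduceIte, List.cons_append, List.nil_append,
            List.append_assoc, List.singleton_append]
          simp
        · rw [if_neg h3, ih]
          have h3' : PySem.Str.isIn "Overload resolution ambiguity" e = false := by
            exact Bool.not_eq_true _ |>.mp h3
          simp only [pvPart_eq, List.filter_cons, h1', h2', h3', Bool.not_true,
            Bool.not_false, reduceIte, List.cons_append, List.nil_append,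
            List.append_assoc, List.singleton_append]
          simp

-- ===== VERDICT (by name: the statement is the Claim_ definition above) =====
theorem parse_errors_spec : Claim_equal_parse_errors := by
  intro errors _
  show parse_errors errors = parse_errors_alt errors
  unfold parse_errors parse_errors_alt
  rw [pvLoopA_eq]
  simp
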